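-- pv_equiv track=rewrite | github.com/bica-tools/reticulate | tests/test_rowmotion.py | _is_antichain
-- ===== SOURCE A (Python) =====
-- def _is_antichain(ac: frozenset[int], order: dict[int, set[int]]) -> bool:
--     """Check that no two elements in ac are comparable."""
--     elems = list(ac)
--     for i in range(len(elems)):
--         for j in range(i + 1, len(elems)):
--             a, b = elems[i], elems[j]
--             if b in order.get(a, set()) or a in order.get(b, set()):
--                 return False
--     return True
-- ===== SOURCE B (Python) =====
-- def _is_antichain(ac, order):
--     """Check that no two elements in ac are comparable."""
--     for a in ac:
--         if order.get(a, set()) & (ac - {a}):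
--             return False
--     return True
-- ===== Notes on version B (the rewrite author's own statement) =====
-- stated objective: simpler
-- what changed: Replaces the nested all-distinct-pairs index loop with a single loop over the antichain that intersects each element's relation set with the rest of the antichain; full iteration covers both comparison directions the pair loop checked.
import Mathlib
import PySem

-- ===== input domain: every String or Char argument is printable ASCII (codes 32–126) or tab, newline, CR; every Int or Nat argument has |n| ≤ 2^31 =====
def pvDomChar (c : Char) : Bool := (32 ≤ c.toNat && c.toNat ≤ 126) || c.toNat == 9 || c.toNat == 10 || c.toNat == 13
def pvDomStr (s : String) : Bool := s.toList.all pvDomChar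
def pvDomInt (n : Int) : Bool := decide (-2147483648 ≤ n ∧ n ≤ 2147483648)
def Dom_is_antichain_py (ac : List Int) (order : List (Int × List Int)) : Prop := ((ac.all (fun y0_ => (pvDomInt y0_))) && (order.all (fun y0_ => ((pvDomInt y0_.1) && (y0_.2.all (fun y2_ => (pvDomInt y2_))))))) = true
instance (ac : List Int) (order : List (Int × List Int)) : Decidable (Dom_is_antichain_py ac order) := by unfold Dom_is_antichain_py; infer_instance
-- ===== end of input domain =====

-- B replaces the nested all-pairs index loop with one loop intersecting each element's
-- relation set with the rest of the antichain (simpler: one short pass over the antichain).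

-- shared helper: order.get(x, set()) on the association-list encoding (lookup = first match)
def pvGet (order : List (Int × List Int)) (x : Int) : List Int :=
  ((order.find? (fun kv => kv.1 == x)).map (·.2)).getD []

-- ===== PORT A =====
def is_antichain_py (ac : List Int) (order : List (Int × List Int)) : Bool :=
  let elems := ac
  !((PySem.List.pyRange 0 elems.length 1).any fun i =>
     (PySem.List.pyRange (i + 1) elems.length 1).any fun j =>
       let a := PySem.List.pyGetD elems i 0   -- i is always in range here
       let b := PySem.List.pyGetD elems j 0   -- j is always in range here
       (pvGet order a).contains b || (pvGet order b).contains a)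

-- ===== PORT B =====
def is_antichain_py_alt (ac : List Int) (order : List (Int × List Int)) : Bool :=
  ac.all fun a => !((pvGet order a).any fun b => ac.contains b && b != a)

-- ===== PRECONDITION & SPEC =====
-- Pre_ excludes lists with duplicate elements: 'ac' encodes a Python frozenset, whose
-- list encoding holds the distinct elements, so a duplicated list is not a valid input.
def Pre_is_antichain_py (ac : List Int) (order : List (Int × List Int)) : Prop := ac.Nodup
instance (ac : List Int) (order : List (Int × List Int)) : Decidable (Pre_is_antichain_py ac order) := by unfold Pre_is_antichain_py; infer_instance
def pvWitness_is_antichain_py : List Int × (List (Int × List Int)) := ([1, 2], [(1, [3])])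

def Spec_is_antichain_py (ac : List Int) (order : List (Int × List Int)) (out : Bool) : Prop := out = is_antichain_py_alt ac order
instance (ac : List Int) (order : List (Int × List Int)) (out : Bool) : Decidable (Spec_is_antichain_py ac order out) := by unfold Spec_is_antichain_py; infer_instance

-- ===== CLAIM (what is proved, stated in full; the proofs are below) =====
def Claim_equal_is_antichain_py : Prop := ∀ (ac : List Int) (order : List (Int × List Int)), Dom_is_antichain_py ac order → Pre_is_antichain_py ac order → Spec_is_antichain_py ac order (is_antichain_py ac order)

-- ===== LEMMAS AND PROOFS =====

-- the "bad pair" predicate both programs detect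
lemma key_iff (ac : List Int) (order : List (Int × List Int)) (hnd : ac.Nodup) :
    (∃ i : Int, (0 ≤ i ∧ i < (ac.length : Int)) ∧ ∃ j : Int, (i + 1 ≤ j ∧ j < (ac.length : Int)) ∧
        ((pvGet order (PySem.List.pyGetD ac i 0)).contains (PySem.List.pyGetD ac j 0) ||
         (pvGet order (PySem.List.pyGetD ac j 0)).contains (PySem.List.pyGetD ac i 0)) = true)
    ↔ (∃ a ∈ ac, ∃ b ∈ pvGet order a, b ∈ ac ∧ b ≠ a) := by
  constructor
  · rintro ⟨i, ⟨hi0, hin⟩, j, ⟨hij, hjn⟩, hP⟩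
    rw [PySem.List.pyGetD_eq_getElem ac 0 hi0 hin, PySem.List.pyGetD_eq_getElem ac 0 (by omega) hjn] at hP
    have hiN : i.toNat < ac.length := by omega
    have hjN : j.toNat < ac.length := by omega
    have hne : ac[i.toNat] ≠ ac[j.toNat] := by
      intro h
      have := (List.Nodup.getElem_inj_iff hnd).mp h
      omega
    rcases Bool.or_eq_true_iff.mp hP with h | h
    · exact ⟨ac[i.toNat], List.getElem_mem _, ac[j.toNat],
        List.contains_iff_mem.mp h, List.getElem_mem _, fun h' => hne h'.symm⟩
    · exact ⟨ac[j.toNat], List.getElem_mem _, ac[i.toNat],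
        List.contains_iff_mem.mp h, List.getElem_mem _, hne⟩
  · rintro ⟨a, ha, b, hb, hbac, hba⟩
    obtain ⟨ia, hia, hae⟩ := List.getElem_of_mem ha
    obtain ⟨ib, hib, hbe⟩ := List.getElem_of_mem hbac
    have hne : ia ≠ ib := by
      intro h; subst h; exact hba (hbe.symm.trans hae)
    rcases Nat.lt_or_ge ia ib with hlt | hge
    · refine ⟨(ia : Int), ⟨by omega, by omega⟩, (ib : Int), ⟨by omega, by omega⟩, ?_⟩
      rw [PySem.List.pyGetD_eq_getElem ac 0 (by omega) (by omega),
          PySem.List.pyGetD_eq_getElem ac 0 (by omega) (by omega)]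
      simp only [Int.toNat_natCast, hae, hbe]
      exact Bool.or_eq_true_iff.mpr (Or.inl (List.contains_iff_mem.mpr hb))
    · have hlt : ib < ia := by omega
      refine ⟨(ib : Int), ⟨by omega, by omega⟩, (ia : Int), ⟨by omega, by omega⟩, ?_⟩
      rw [PySem.List.pyGetD_eq_getElem ac 0 (by omega) (by omega),
          PySem.List.pyGetD_eq_getElem ac 0 (by omega) (by omega)]
      simp only [Int.toNat_natCast, hae, hbe]
      exact Bool.or_eq_true_iff.mpr (Or.inr (List.contains_iff_mem.mpr hb))

-- characterization of A's nested pair loop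
lemma charA (ac : List Int) (order : List (Int × List Int)) :
    is_antichain_py ac order = true ↔
    ¬ (∃ i : Int, (0 ≤ i ∧ i < (ac.length : Int)) ∧ ∃ j : Int, (i + 1 ≤ j ∧ j < (ac.length : Int)) ∧
        ((pvGet order (PySem.List.pyGetD ac i 0)).contains (PySem.List.pyGetD ac j 0) ||
         (pvGet order (PySem.List.pyGetD ac j 0)).contains (PySem.List.pyGetD ac i 0)) = true) := by
  simp only [is_antichain_py, Bool.not_eq_true', List.any_eq_false, List.any_eq_true,
    PySem.List.mem_pyRange_one, not_exists, not_and, Bool.not_eq_true]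

-- characterization of B's single loop
lemma charB (ac : List Int) (order : List (Int × List Int)) :
    is_antichain_py_alt ac order = true ↔
    ¬ (∃ a ∈ ac, ∃ b ∈ pvGet order a, b ∈ ac ∧ b ≠ a) := by
  simp only [is_antichain_py_alt, List.all_eq_true, Bool.not_eq_true', List.any_eq_false,
    not_exists, not_and]
  constructor
  · intro h a ha b hb hbac hba
    exact absurd (by simp [hbac, hba] : (ac.contains b && b != a) = true)
      (h a ha b hb)
  · intro h a ha b hb hc
    simp only [Bool.and_eq_true, List.contains_iff_mem, bne_iff_ne] at hc
    exact h a ha b hb hc.1 hc.2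

-- ===== VERDICT (by name: the statement is the Claim_ definition above) =====
theorem is_antichain_py_spec : Claim_equal_is_antichain_py := by
  intro ac order _ hnd
  unfold Spec_is_antichain_py
  rw [Bool.eq_iff_iff, charA, charB, key_iff ac order hnd]
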